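-- pv_equiv track=rewrite | github.com/tejasnikumbh/Algorithms | Warmup/ManasaAndStones.py | genResults
-- ===== SOURCE A (Python) =====
-- def genResults(n,a,b):
--     resultSet = set()
--     for k in range(n):
--         curEntry = a*(n-1-k) + b*k
--         if(curEntry not in resultSet):
--             resultSet.add(curEntry)
--     results = []
--     for x in resultSet:
--         results.append(x)
--     results.sort()
--     return results
-- ===== SOURCE B (Python) =====
-- def genResults(n, a, b):
--     # The values a*(n-1-k)+b*k form an arithmetic progression start + k*d:
--     # emit it directly in sorted order, no set and no sort needed.
--     if n <= 0:
--         return []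
--     d = b - a
--     start = a * (n - 1)
--     if d == 0:
--         return [start]
--     if d > 0:
--         return [start + k * d for k in range(n)]
--     return [start + k * d for k in range(n - 1, -1, -1)]
-- ===== Notes on version B (the rewrite author's own statement) =====
-- stated objective: faster
-- what changed: B recognises the values as an arithmetic progression start+k*(b-a) and emits it directly in sorted order (reversed when b<a, a single value when b==a), eliminating both the set and the sort.
import Mathlib
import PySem

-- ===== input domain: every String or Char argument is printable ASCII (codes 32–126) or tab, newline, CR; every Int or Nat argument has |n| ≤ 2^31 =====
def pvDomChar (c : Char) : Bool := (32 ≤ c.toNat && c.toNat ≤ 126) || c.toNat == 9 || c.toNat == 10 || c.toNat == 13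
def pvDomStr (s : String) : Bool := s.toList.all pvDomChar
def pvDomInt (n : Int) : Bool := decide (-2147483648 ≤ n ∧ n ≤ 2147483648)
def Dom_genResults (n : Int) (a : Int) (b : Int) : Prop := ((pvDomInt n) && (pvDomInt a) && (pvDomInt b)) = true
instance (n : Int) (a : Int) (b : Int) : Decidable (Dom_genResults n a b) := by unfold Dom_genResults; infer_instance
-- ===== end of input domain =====

-- B replaces A's set+sort with directly generating the arithmetic progression in sorted order (O(n) vs O(n log n)).


-- ===== PORT A =====
def genResults (n : Int) (a : Int) (b : Int) : List Int :=
  let resultSet : PySem.Set Int :=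
    (PySem.List.pyRange 0 n 1).foldl (fun s k =>
      let curEntry := a * (n - 1 - k) + b * k
      if PySem.Set.contains s curEntry then s else PySem.Set.add s curEntry) []
  let results : List Int := resultSet.foldl (fun r x => r ++ [x]) []
  PySem.List.sorted results (fun x => x) false

-- ===== PORT B =====
def genResults_alt (n : Int) (a : Int) (b : Int) : List Int :=
  if n ≤ 0 then []
  else
    let d := b - a
    let start := a * (n - 1)
    if d = 0 then [start]
    else if d > 0 then (PySem.List.pyRange 0 n 1).map (fun k => start + k * d)
    else (PySem.List.pyRange (n - 1) (-1) (-1)).map (fun k => start + k * d)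

-- ===== PRECONDITION & SPEC =====
def Spec_genResults (n : Int) (a : Int) (b : Int) (out : List Int) : Prop := out = genResults_alt n a b
instance (n : Int) (a : Int) (b : Int) (out : List Int) : Decidable (Spec_genResults n a b out) := by unfold Spec_genResults; infer_instance

-- ===== CLAIM (what is proved, stated in full; the proofs are below) =====
def Claim_equal_genResults : Prop := ∀ (n : Int) (a : Int) (b : Int), Dom_genResults n a b → Spec_genResults n a b (genResults n a b)

-- ===== LEMMAS AND PROOFS =====

theorem foldl_append_singleton (l : List Int) (r : List Int) :
    l.foldl (fun r x => r ++ [x]) r = r ++ l := by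
  induction l generalizing r with
  | nil => simp
  | cons x xs ih => simp [List.foldl, ih]

theorem body_eq_add (s : PySem.Set Int) (c : Int) :
    (if PySem.Set.contains s c then s else PySem.Set.add s c) = PySem.Set.add s c := by
  unfold PySem.Set.add
  split <;> simp_all

-- A's result is sorted(set(L)) where L is the list of progression values
theorem genResults_eq_sorted (n a b : Int) :
    genResults n a b =
      PySem.List.sorted
        (PySem.Set.ofList ((PySem.List.pyRange 0 n 1).map (fun k => a * (n - 1 - k) + b * k)))
        (fun x => x) false := by
  unfold genResults
  simp only [body_eq_add]
  rw [← PySem.Set.update_map_eq_foldl_add, PySem.Set.update_nil_left,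
    foldl_append_singleton]
  simp

theorem ofList_const (c : Int) (l : List Int) (h : ∀ x ∈ l, x = c) (hne : l ≠ []) :
    PySem.Set.ofList l = [c] := by
  induction l with
  | nil => simp at hne
  | cons x xs ih =>
    rw [PySem.Set.ofList_cons]
    have hx : x = c := h x (by simp)
    subst hx
    rcases List.eq_nil_or_concat xs with h0 | _
    · subst h0; simp [PySem.Set.discard]
    · have hxs : PySem.Set.ofList xs = [x] := by
        apply ih (fun y hy => h y (by simp [hy]))
        rintro rfl; simp_all
      rw [hxs]
      simp [PySem.Set.discard]

theorem pairwise_map_range (n : Int) (f : Int → Int) (R : Int → Int → Prop)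
    (h : ∀ i j : Int, i < j → R (f i) (f j)) :
    ((PySem.List.pyRange 0 n 1).map f).Pairwise (fun x y => R x y) := by
  rw [List.pairwise_map]
  exact (PySem.List.pairwise_lt_pyRange_one 0 n).imp_of_mem (fun _ _ hij => h _ _ hij)

theorem genResults_spec_aux (n a b : Int) : genResults n a b = genResults_alt n a b := by
  rw [genResults_eq_sorted]
  unfold genResults_alt
  set f : Int → Int := fun k => a * (n - 1 - k) + b * k with hf
  by_cases hn : n ≤ 0
  · simp [hn, PySem.List.pyRange_one_eq_nil hn, PySem.Set.ofList_nil, PySem.List.sorted]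
  · push Not at hn
    simp only [if_neg (not_le.mpr hn)]
    by_cases hd : b - a = 0
    · -- constant progression
      simp only [if_pos hd]
      have hc : ∀ x ∈ (PySem.List.pyRange 0 n 1).map f, x = a * (n - 1) := by
        intro x hx
        rcases List.mem_map.mp hx with ⟨k, _, rfl⟩
        have : b = a := by omega
        simp only [hf]; subst this; ring
      have hne : (PySem.List.pyRange 0 n 1).map f ≠ [] := by
        simp [PySem.List.pyRange_one, List.range_eq_nil]
        omega
      rw [ofList_const _ _ hc hne]
      simp [PySem.List.sorted, PySem.List.insertBy]
    · simp only [if_neg hd]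
      have hval : ∀ k : Int, f k = a * (n - 1) + k * (b - a) := by intro k; simp [hf]; ring
      by_cases hpos : b - a > 0
      · -- strictly increasing: the list itself is sorted and nodup
        simp only [if_pos hpos]
        have hpw : ((PySem.List.pyRange 0 n 1).map f).Pairwise (fun x y => x < y) := by
          apply pairwise_map_range
          intro i j hij
          rw [hval, hval]
          have : (j - i) * (b - a) > 0 := mul_pos (by omega) hpos
          nlinarith
        have hnd : ((PySem.List.pyRange 0 n 1).map f).Nodup := hpw.imp (fun h => ne_of_lt h)
        rw [PySem.Set.ofList_eq_self_of_nodup _ hnd]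
        rw [PySem.List.sorted_eq_of_perm_of_pairwise_lt _ _ _ (List.Perm.refl _) hpw]
        exact List.map_congr_left (fun k _ => hval k)
      · -- strictly decreasing: reverse is sorted
        have hneg : b - a < 0 := by omega
        simp only [if_neg hpos]
        have hpw : ((PySem.List.pyRange 0 n 1).map f).Pairwise (fun x y => x > y) := by
          apply pairwise_map_range
          intro i j hij
          rw [hval, hval]
          have : (j - i) * (b - a) < 0 := mul_neg_of_pos_of_neg (by omega) hneg
          nlinarith
        have hnd : ((PySem.List.pyRange 0 n 1).map f).Nodup := hpw.imp (fun h => ne_of_gt h)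
        rw [PySem.Set.ofList_eq_self_of_nodup _ hnd]
        have hrevpw : ((PySem.List.pyRange 0 n 1).map f).reverse.Pairwise (fun x y => x < y) := by
          rw [List.pairwise_reverse]; exact hpw
        rw [PySem.List.sorted_eq_of_perm_of_pairwise_lt _ _ _ (List.reverse_perm _) hrevpw]
        rw [PySem.List.pyRange_neg_one_eq_reverse]
        have e1 : n - 1 + 1 = n := by ring
        have e2 : (-1 : Int) + 1 = 0 := by ring
        rw [e1, e2, ← List.map_reverse]
        exact List.map_congr_left (fun k _ => hval k)

-- ===== VERDICT (by name: the statement is the Claim_ definition above) =====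
theorem genResults_spec : Claim_equal_genResults := by
  intro n a b _
  exact genResults_spec_aux n a b
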